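-- pv_equiv track=rewrite | github.com/VV-Para/Python-foundation | best movie/DoubanCrawler.py | Dict_Movie
-- ===== SOURCE A (Python) =====
-- def Dict_Movie(list):
--
-- 	#二维字典movie_dict存储每种类型电影中每个地区的数量
-- 	movie_dict = {}
--
-- 	#item的第3项表示电影的地区，第4项表示电影的类型
-- 	#统计每个类型中每个地区的数量
-- 	for item in list:
-- 		if item[3] in movie_dict:
-- 			if item[2] in movie_dict[item[3]]:
-- 				movie_dict[item[3]].update({item[2]:(movie_dict[item[3]][item[2]]+1)})
--
-- 			else:
-- 				movie_dict[item[3]].update({item[2]:1})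
-- 		else:
-- 			movie_dict.update({item[3]:{item[2]:1}})
--
-- 	return movie_dict
-- ===== SOURCE B (Python) =====
-- def Dict_Movie(list):
--     # group regions by type first, then count per group (two-pass decomposition)
--     groups = {}
--     for item in list:
--         groups.setdefault(item[3], []).append(item[2])
--     movie_dict = {}
--     for movie_type, regions in groups.items():
--         counts = {}
--         for region in regions:
--             counts[region] = counts.get(region, 0) + 1
--         movie_dict[movie_type] = counts
--     return movie_dict
-- ===== Notes on version B (the rewrite author's own statement) =====
-- stated objective: alternative
-- what changed: B replaces A's single-pass nested dict-branch accumulation by a two-pass decomposition: first group regions by movie type into lists, then count each group's regions into the inner dicts.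
import Mathlib
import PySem

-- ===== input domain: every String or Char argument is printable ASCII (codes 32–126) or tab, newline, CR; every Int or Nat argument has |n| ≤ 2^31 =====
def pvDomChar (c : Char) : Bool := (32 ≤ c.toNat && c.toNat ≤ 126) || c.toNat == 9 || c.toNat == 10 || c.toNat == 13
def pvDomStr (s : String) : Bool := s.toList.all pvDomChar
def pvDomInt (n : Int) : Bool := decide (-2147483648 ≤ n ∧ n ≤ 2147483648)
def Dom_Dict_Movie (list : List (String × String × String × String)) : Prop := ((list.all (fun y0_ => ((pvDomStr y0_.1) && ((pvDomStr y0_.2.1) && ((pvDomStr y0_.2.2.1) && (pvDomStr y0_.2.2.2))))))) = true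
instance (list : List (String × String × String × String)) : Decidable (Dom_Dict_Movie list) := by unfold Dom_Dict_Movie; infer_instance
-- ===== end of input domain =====

-- B groups regions by movie type in one pass and then counts each group, instead of A's
-- nested dict-branch accumulation; objective: alternative decomposition (same cost).


-- ===== PORT A =====
def Dict_Movie (list : List (String × String × String × String)) : List (String × List (String × Int)) :=
  let movie_dict : PySem.Dict String (PySem.Dict String Int) :=
    list.foldl (fun d item =>
      if d.contains item.2.2.2 then
        let inner := d.getD item.2.2.2 PySem.Dict.empty
        if inner.contains item.2.2.1 then
          d.insert item.2.2.2 (inner.insert item.2.2.1 (inner.getD item.2.2.1 0 + 1))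
        else
          d.insert item.2.2.2 (inner.insert item.2.2.1 1)
      else
        d.insert item.2.2.2 (PySem.Dict.ofList [(item.2.2.1, (1 : Int))]))
      PySem.Dict.empty
  movie_dict.items.map (fun p => (p.1, p.2.items))

-- ===== PORT B =====
def Dict_Movie_alt (list : List (String × String × String × String)) : List (String × List (String × Int)) :=
  let groups : PySem.Dict String (List String) :=
    list.foldl (fun d item => d.modify item.2.2.2 [] (· ++ [item.2.2.1])) PySem.Dict.empty
  let movie_dict : PySem.Dict String (PySem.Dict String Int) :=
    groups.items.foldl (fun md p =>
      let counts := p.2.foldl (fun c r => c.insert r (c.getD r 0 + 1)) PySem.Dict.empty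
      md.insert p.1 counts) PySem.Dict.empty
  movie_dict.items.map (fun p => (p.1, p.2.items))

-- ===== PRECONDITION & SPEC =====
def Spec_Dict_Movie (list : List (String × String × String × String)) (out : List (String × List (String × Int))) : Prop := out = Dict_Movie_alt list
instance (list : List (String × String × String × String)) (out : List (String × List (String × Int))) : Decidable (Spec_Dict_Movie list out) := by unfold Spec_Dict_Movie; infer_instance

-- ===== CLAIM (what is proved, stated in full; the proofs are below) =====
def Claim_equal_Dict_Movie : Prop := ∀ (list : List (String × String × String × String)), Dom_Dict_Movie list → Spec_Dict_Movie list (Dict_Movie list)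

-- ===== LEMMAS AND PROOFS =====


def pvPr (x : String × String × String × String) : String × String := (x.2.2.2, x.2.2.1)

def pvRegs (t : String) (l : List (String × String × String × String)) : List String :=
  ((l.map pvPr).filter (fun p => p.1 == t)).map (·.2)

def pvCanon (l : List (String × String × String × String)) :
    List (String × PySem.Dict String Int) :=
  (PySem.Set.ofList (l.map (·.2.2.2))).map (fun t => (t, PySem.Dict.counter (pvRegs t l)))

def pvStepA (d : PySem.Dict String (PySem.Dict String Int))
    (item : String × String × String × String) : PySem.Dict String (PySem.Dict String Int) :=
  if d.contains item.2.2.2 then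
    let inner := d.getD item.2.2.2 PySem.Dict.empty
    if inner.contains item.2.2.1 then
      d.insert item.2.2.2 (inner.insert item.2.2.1 (inner.getD item.2.2.1 0 + 1))
    else
      d.insert item.2.2.2 (inner.insert item.2.2.1 1)
  else
    d.insert item.2.2.2 (PySem.Dict.ofList [(item.2.2.1, (1 : Int))])

theorem pvRegs_append (t : String) (l : List (String × String × String × String)) (x) :
    pvRegs t (l ++ [x]) = pvRegs t l ++ (if x.2.2.2 == t then [x.2.2.1] else []) := by
  simp only [pvRegs, List.map_append, List.filter_append, pvPr, List.map_cons, List.map_nil]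
  by_cases h : x.2.2.2 = t <;> simp [h]

theorem pvRegs_of_not_mem (t : String) (l : List (String × String × String × String))
    (h : t ∉ l.map (·.2.2.2)) : pvRegs t l = [] := by
  simp only [pvRegs, List.map_eq_nil_iff, List.filter_eq_nil_iff]
  intro p hp
  simp only [List.mem_map, pvPr] at hp
  obtain ⟨y, hy, rfl⟩ := hp
  simp only [beq_iff_eq]
  exact fun he => h (List.mem_map.mpr ⟨y, hy, he⟩)

theorem pv_counter_singleton (R : String) :
    PySem.Dict.counter [R] = PySem.Dict.ofList [(R, (1 : Int))] := rfl

theorem pv_modify_eq_insert (d : PySem.Dict String Int) (k : String) (d0 : Int) (f : Int → Int) :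
    d.modify k d0 f = d.insert k (f (d.getD k d0)) := PySem.Dict.ext_iff.mpr rfl

theorem pvStepA_canon (l : List (String × String × String × String)) (x) :
    pvStepA (PySem.Dict.mk (pvCanon l)) x = PySem.Dict.mk (pvCanon (l ++ [x])) := by
  have hkeys : (PySem.Dict.mk (pvCanon l)).keys
      = PySem.Set.ofList (l.map (·.2.2.2)) := by
    rw [PySem.Dict.keys_mk, pvCanon, List.map_map]
    exact (List.map_congr_left (fun a _ => rfl)).trans (List.map_id _)
  have hnd : (PySem.Dict.mk (pvCanon l)).keys.Nodup := by
    rw [hkeys]; exact PySem.Set.nodup_ofList _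
  have hcont : (PySem.Dict.mk (pvCanon l)).contains x.2.2.2
      = decide (x.2.2.2 ∈ l.map (·.2.2.2)) := by
    rw [PySem.Dict.contains_eq_decide_mem_keys, hkeys]
    simp [PySem.Set.mem_ofList]
  have hcanon_app : pvCanon (l ++ [x])
      = (PySem.Set.add (PySem.Set.ofList (l.map (·.2.2.2))) x.2.2.2).map
          (fun t => (t, PySem.Dict.counter (pvRegs t (l ++ [x])))) := by
    simp [pvCanon, List.map_append, PySem.Set.ofList_append_singleton]
  by_cases hmem : x.2.2.2 ∈ l.map (·.2.2.2)
  · -- type seen before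
    have hc : (PySem.Dict.mk (pvCanon l)).contains x.2.2.2 = true := by
      rw [hcont]; simp [hmem]
    have hmemS : x.2.2.2 ∈ PySem.Set.ofList (l.map (·.2.2.2)) :=
      (PySem.Set.mem_ofList _ _).mpr hmem
    have hgetD : (PySem.Dict.mk (pvCanon l)).getD x.2.2.2 PySem.Dict.empty
        = PySem.Dict.counter (pvRegs x.2.2.2 l) := by
      have hmemIt : (x.2.2.2, PySem.Dict.counter (pvRegs x.2.2.2 l)) ∈ pvCanon l :=
        List.mem_map.mpr ⟨x.2.2.2, hmemS, rfl⟩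
      exact PySem.Dict.getD_of_mem_items (PySem.Dict.mk (pvCanon l)) hmemIt hnd PySem.Dict.empty
    have hnew : PySem.Dict.counter (pvRegs x.2.2.2 (l ++ [x]))
        = (PySem.Dict.counter (pvRegs x.2.2.2 l)).insert x.2.2.1
            (((pvRegs x.2.2.2 l).count x.2.2.1 : Int) + 1) := by
      rw [pvRegs_append]
      simp only [beq_self_eq_true, if_pos]
      rw [PySem.Dict.counter_append_singleton, pv_modify_eq_insert,
        PySem.Dict.getD_counter]
    have key : pvStepA (PySem.Dict.mk (pvCanon l)) x
        = (PySem.Dict.mk (pvCanon l)).insert x.2.2.2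
            (PySem.Dict.counter (pvRegs x.2.2.2 (l ++ [x]))) := by
      unfold pvStepA
      rw [hc, if_pos rfl]
      simp only [hgetD, hnew]
      by_cases hr : x.2.2.1 ∈ pvRegs x.2.2.2 l
      · rw [if_pos, PySem.Dict.getD_counter]
        · rw [PySem.Dict.contains_counter]; simp [hr]
      · rw [if_neg]
        · rw [List.count_eq_zero.mpr hr]; norm_num
        · rw [PySem.Dict.contains_counter]; simp [hr]
    rw [key]
    apply PySem.Dict.ext
    rw [PySem.Dict.items_insert_of_contains _ _ hc]
    show (pvCanon l).map _ = pvCanon (l ++ [x])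
    rw [hcanon_app, PySem.Set.add_of_mem hmemS]
    simp only [pvCanon, List.map_map]
    apply List.map_congr_left
    intro t _
    simp only [Function.comp_apply]
    by_cases ht : t = x.2.2.2
    · subst ht; simp
    · have h1 : (t == x.2.2.2) = false := by simp [ht]
      simp only [h1, Bool.false_eq_true, if_false]
      rw [pvRegs_append]
      have h2 : (x.2.2.2 == t) = false := beq_eq_false_iff_ne.mpr (Ne.symm ht)
      simp [h2]
  · -- fresh type
    have hc : (PySem.Dict.mk (pvCanon l)).contains x.2.2.2 = false := by
      rw [hcont]; simp [hmem]
    have hnotS : x.2.2.2 ∉ PySem.Set.ofList (l.map (·.2.2.2)) := by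
      rw [PySem.Set.mem_ofList]; exact hmem
    unfold pvStepA
    rw [hc, if_neg Bool.false_ne_true]
    apply PySem.Dict.ext
    rw [PySem.Dict.items_insert_of_not_contains _ _ hc]
    show pvCanon l ++ _ = pvCanon (l ++ [x])
    rw [hcanon_app, PySem.Set.add_of_not_mem hnotS, List.map_append]
    congr 1
    · simp only [pvCanon]
      apply List.map_congr_left
      intro t htS
      rw [pvRegs_append]
      have : (x.2.2.2 == t) = false := by
        simp only [beq_eq_false_iff_ne, ne_eq]
        intro he; exact hnotS (he ▸ htS)
      simp [this]
    · simp only [List.map_cons, List.map_nil]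
      rw [pvRegs_append]
      simp only [beq_self_eq_true, if_pos]
      rw [pvRegs_of_not_mem _ _ hmem]
      simp [pv_counter_singleton]

theorem pvA_canon (l : List (String × String × String × String)) :
    (l.foldl pvStepA PySem.Dict.empty) = PySem.Dict.mk (pvCanon l) := by
  induction l using List.reverseRecOn with
  | nil => rfl
  | append_singleton l x ih =>
    rw [List.foldl_append, List.foldl_cons, List.foldl_nil, ih, pvStepA_canon]

theorem pvGroups_eq (l : List (String × String × String × String)) :
    l.foldl (fun d item => d.modify item.2.2.2 [] (· ++ [item.2.2.1]))
        (PySem.Dict.empty : PySem.Dict String (List String))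
      = (l.map pvPr).foldl (fun d p => d.modify p.1 [] (· ++ [p.2])) PySem.Dict.empty := by
  rw [List.foldl_map]; rfl

theorem pvB_canon (l : List (String × String × String × String)) :
    ((l.foldl (fun d item => d.modify item.2.2.2 [] (· ++ [item.2.2.1]))
        (PySem.Dict.empty : PySem.Dict String (List String))).items.foldl
      (fun md p =>
        md.insert p.1 (p.2.foldl (fun c r => c.insert r (c.getD r 0 + 1)) PySem.Dict.empty))
      PySem.Dict.empty) = PySem.Dict.mk (pvCanon l) := by
  have hg := pvGroups_eq l
  set groups := l.foldl (fun d item => d.modify item.2.2.2 [] (· ++ [item.2.2.1]))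
        (PySem.Dict.empty : PySem.Dict String (List String)) with hgdef
  have hkeys : groups.keys = PySem.Set.ofList (l.map (·.2.2.2)) := by
    rw [hgdef, PySem.Dict.keys_foldl_modify_key l (fun item => item.2.2.2) [] (fun _ item rs => rs ++ [item.2.2.1])]
    simp [PySem.Dict.keys, PySem.Dict.empty, PySem.Set.update_nil_left]
  have hnd : groups.keys.Nodup := by
    rw [hkeys]; exact PySem.Set.nodup_ofList _
  have hgetD : ∀ t, groups.getD t [] = pvRegs t l := by
    intro t
    rw [hg, PySem.Dict.getD_foldl_modify_append (l.map pvPr) PySem.Dict.empty t]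
    simp [pvRegs, PySem.Dict.getD_empty]
  have hitems : groups.items
      = (PySem.Set.ofList (l.map (·.2.2.2))).map (fun t => (t, pvRegs t l)) := by
    rw [PySem.Dict.items_eq_map_keys groups hnd [], hkeys]
    exact List.map_congr_left (fun t _ => by rw [hgetD t])
  apply PySem.Dict.ext
  have hf := PySem.Dict.items_foldl_insert_fresh (l := groups.items) (k := fun p => p.1)
        (v := fun p : String × List String =>
          List.foldl (fun (c : PySem.Dict String Int) r => c.insert r (c.getD r 0 + 1)) PySem.Dict.empty p.2)
        (d := (PySem.Dict.empty : PySem.Dict String (PySem.Dict String Int)))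
        (fun _ _ => PySem.Dict.contains_empty _)
        (by rw [show groups.items.map (fun p => p.1) = groups.keys from rfl]; exact hnd)
  rw [hf]
  rw [hitems]
  simp only [List.map_map, pvCanon]
  rw [show (PySem.Dict.empty : PySem.Dict String (PySem.Dict String Int)).items = [] from rfl,
    List.nil_append]
  exact List.map_congr_left (fun t _ => by
    simp only [Function.comp]
    rw [PySem.Dict.foldl_insert_getD_add_one_eq_counter])

theorem pvA_canon' (l : List (String × String × String × String)) :
    (l.foldl (fun d item =>
      if d.contains item.2.2.2 then
        let inner := d.getD item.2.2.2 PySem.Dict.empty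
        if inner.contains item.2.2.1 then
          d.insert item.2.2.2 (inner.insert item.2.2.1 (inner.getD item.2.2.1 0 + 1))
        else
          d.insert item.2.2.2 (inner.insert item.2.2.1 1)
      else
        d.insert item.2.2.2 (PySem.Dict.ofList [(item.2.2.1, (1 : Int))]))
      PySem.Dict.empty) = PySem.Dict.mk (pvCanon l) := pvA_canon l

-- ===== VERDICT (by name: the statement is the Claim_ definition above) =====
theorem Dict_Movie_spec : Claim_equal_Dict_Movie := by
  intro l _
  unfold Spec_Dict_Movie Dict_Movie Dict_Movie_alt
  simp only [pvA_canon', pvB_canon]
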